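-- pv_equiv track=rewrite | github.com/bobergda/locaLLM-bench | runner.py | _longest_tag_prefix_suffix
-- ===== SOURCE A (Python) =====
-- def _longest_tag_prefix_suffix(text: str, tags: tuple[str, ...]) -> int:
--     max_len = 0
--     for tag in tags:
--         limit = min(len(tag) - 1, len(text))
--         for i in range(1, limit + 1):
--             if text.endswith(tag[:i]) and i > max_len:
--                 max_len = i
--     return max_len
-- ===== SOURCE B (Python) =====
-- def _longest_tag_prefix_suffix(text: str, tags: tuple[str, ...]) -> int:
--     # Scan candidate lengths from the longest possible down; first hit wins.
--     hi = min(len(text), max([0] + [len(t) - 1 for t in tags]))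
--     for k in range(hi, 0, -1):
--         suf = text[len(text) - k:]
--         if any(len(t) > k and t.startswith(suf) for t in tags):
--             return k
--     return 0
-- ===== Notes on version B (the rewrite author's own statement) =====
-- stated objective: faster
-- what changed: A scans each tag separately with an ascending inner loop over all candidate prefix lengths and tracks a running maximum; B computes the global length bound once and makes a single descending scan over candidate suffix lengths, returning at the first (i.e. longest) length whose text-suffix is a proper prefix of some tag.
import Mathlib
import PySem

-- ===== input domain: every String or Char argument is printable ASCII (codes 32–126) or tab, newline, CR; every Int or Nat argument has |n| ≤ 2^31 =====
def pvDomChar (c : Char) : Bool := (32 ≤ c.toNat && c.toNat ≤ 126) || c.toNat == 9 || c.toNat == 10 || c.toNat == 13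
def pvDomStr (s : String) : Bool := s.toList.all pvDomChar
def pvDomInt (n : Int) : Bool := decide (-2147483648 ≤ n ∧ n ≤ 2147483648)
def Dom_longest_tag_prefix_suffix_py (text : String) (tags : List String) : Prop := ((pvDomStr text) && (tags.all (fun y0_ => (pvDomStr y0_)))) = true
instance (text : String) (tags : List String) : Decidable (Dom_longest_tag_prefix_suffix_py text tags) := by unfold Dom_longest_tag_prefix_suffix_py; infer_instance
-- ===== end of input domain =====

-- B replaces A's per-tag ascending scans with a single descending scan over candidate lengths
-- that returns at the first hit, so it stops as soon as the answer is found (measured faster).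

-- ===== PORT A =====
def longest_tag_prefix_suffix_py (text : String) (tags : List String) : Int :=
  tags.foldl
    (fun max_len tag =>
      let limit : Int := min (PySem.Str.len tag - 1) (PySem.Str.len text)
      (PySem.List.pyRange 1 (limit + 1) 1).foldl
        (fun m i =>
          if PySem.Str.endswith text (PySem.Str.slice tag none (some i)) && decide (i > m)
          then i else m)
        max_len)
    0

-- ===== PORT B =====
-- Source B's 'any(len(t) > k and t.startswith(suf) for t in tags)' test at candidate length kk
def pvCondB (text : String) (tags : List String) (kk : Int) : Bool :=
  tags.any (fun t =>
    decide (kk < PySem.Str.len t) &&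
    PySem.Str.startswith t (PySem.Str.slice text (some (PySem.Str.len text - kk)) none))

-- Source B's 'for k in range(hi, 0, -1): … return k' loop (early return = stop at first hit)
def pvAltGo (text : String) (tags : List String) : Nat → Int
  | 0 => 0
  | Nat.succ k =>
      if pvCondB text tags ((k : Int) + 1) then (k : Int) + 1
      else pvAltGo text tags k

def longest_tag_prefix_suffix_py_alt (text : String) (tags : List String) : Int :=
  let hi : Int := min (PySem.Str.len text)
      (tags.foldl (fun m t => max m (PySem.Str.len t - 1)) 0)
  pvAltGo text tags hi.toNat

-- ===== PRECONDITION & SPEC =====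
def Spec_longest_tag_prefix_suffix_py (text : String) (tags : List String) (out : Int) : Prop := out = longest_tag_prefix_suffix_py_alt text tags
instance (text : String) (tags : List String) (out : Int) : Decidable (Spec_longest_tag_prefix_suffix_py text tags out) := by unfold Spec_longest_tag_prefix_suffix_py; infer_instance

-- ===== CLAIM (what is proved, stated in full; the proofs are below) =====
def Claim_equal_longest_tag_prefix_suffix_py : Prop := ∀ (text : String) (tags : List String), Dom_longest_tag_prefix_suffix_py text tags → Spec_longest_tag_prefix_suffix_py text tags (longest_tag_prefix_suffix_py text tags)

-- ===== LEMMAS AND PROOFS =====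

-- "some tag has its length-k prefix as a suffix of text" — the property both programs maximise
def pvP (s : List Char) (tags : List String) (k : Nat) : Prop :=
  ∃ t ∈ tags, k < t.toList.length ∧ t.toList.take k <:+ s

-- A's inner-loop test at candidate i, and A's inner-loop step
def pvCondA (text t : String) (i : Int) : Bool :=
  PySem.Str.endswith text (PySem.Str.slice t none (some i))
def pvStepA (text t : String) (m i : Int) : Int :=
  if pvCondA text t i && decide (i > m) then i else m

lemma portA_eq (text : String) (tags : List String) :
    longest_tag_prefix_suffix_py text tags =
      tags.foldl (fun a t =>
        (PySem.List.pyRange 1 (min (PySem.Str.len t - 1) (PySem.Str.len text) + 1) 1).foldl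
          (pvStepA text t) a) 0 := rfl

lemma pvP_le (s : List Char) (tags : List String) (k : Nat) (h : pvP s tags k) :
    k ≤ s.length := by
  obtain ⟨t, _, hkt, hsuf⟩ := h
  have h1 := hsuf.length_le
  rw [List.length_take] at h1
  omega

lemma prefix_suffix_swap (t s : List Char) (k : Nat) (hk : k ≤ s.length) (hkt : k < t.length) :
    (t.take k <:+ s) ↔ (s.drop (s.length - k) <+: t) := by
  have hl1 : (t.take k).length = k := by simp; omega
  have hl2 : (s.drop (s.length - k)).length = k := by simp; omega
  constructor
  · intro h
    rw [List.suffix_iff_eq_drop, hl1] at h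
    rw [List.prefix_iff_eq_take, hl2, ← h]
  · intro h
    rw [List.prefix_iff_eq_take, hl2] at h
    rw [List.suffix_iff_eq_drop, hl1, ← h]

lemma condA_iff (text t : String) (i : Int) (h1 : 1 ≤ i) :
    pvCondA text t i = true ↔ t.toList.take i.toNat <:+ text.toList := by
  unfold pvCondA
  rw [PySem.Str.endswith_eq]
  rw [PySem.Chars.endswith_iff]
  have : (PySem.Str.slice t none (some i)).toList = t.toList.take i.toNat := by
    simp [PySem.Str.slice]
    exact PySem.List.slice_to t.toList (by omega)
  rw [this]

lemma condB_iff (text : String) (tags : List String) (k : Nat) (hk : k + 1 ≤ text.toList.length) :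
    pvCondB text tags ((k : Int) + 1) = true ↔ pvP text.toList tags (k + 1) := by
  unfold pvCondB pvP
  rw [List.any_eq_true]
  constructor
  · rintro ⟨t, ht, hc⟩
    simp only [Bool.and_eq_true, decide_eq_true_eq] at hc
    obtain ⟨hlt, hsw⟩ := hc
    rw [PySem.Str.startswith_eq, PySem.Chars.startswith_iff] at hsw
    have hlt' : k + 1 < t.toList.length := by
      rw [PySem.Str.len_eq] at hlt; exact_mod_cast hlt
    refine ⟨t, ht, hlt', ?_⟩
    have hsl : (PySem.Str.slice text (some (PySem.Str.len text - ((k:Int)+1))) none).toList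
        = text.toList.drop (text.toList.length - (k+1)) := by
      have hlen : text.toList.length = text.length := by simp
      simp only [PySem.Str.slice, String.toList_ofList, PySem.Str.len_eq, PySem.Chars.slice]
      rw [PySem.List.slice_from text.toList (by omega)]
      congr 1
      omega
    rw [hsl] at hsw
    exact (prefix_suffix_swap t.toList text.toList (k+1) hk hlt').mpr hsw
  · rintro ⟨t, ht, hlt, hsuf⟩
    refine ⟨t, ht, ?_⟩
    simp only [Bool.and_eq_true, decide_eq_true_eq]
    constructor
    · rw [PySem.Str.len_eq]; exact_mod_cast hlt
    · rw [PySem.Str.startswith_eq, PySem.Chars.startswith_iff]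
      have hsl : (PySem.Str.slice text (some (PySem.Str.len text - ((k:Int)+1))) none).toList
          = text.toList.drop (text.toList.length - (k+1)) := by
        have hlen : text.toList.length = text.length := by simp
        simp only [PySem.Str.slice, String.toList_ofList, PySem.Str.len_eq, PySem.Chars.slice]
        rw [PySem.List.slice_from text.toList (by omega)]
        congr 1
        omega
      rw [hsl]
      exact (prefix_suffix_swap t.toList text.toList (k+1) hk hlt).mp hsuf

lemma foldmax_init (tags : List String) (acc : Int) :
    acc ≤ tags.foldl (fun m t => max m (PySem.Str.len t - 1)) acc := by
  induction tags generalizing acc with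
  | nil => simp
  | cons t ts ih =>
      simp only [List.foldl_cons]
      exact le_trans (le_max_left _ _) (ih _)

lemma foldmax_mem (tags : List String) (t : String) (ht : t ∈ tags) (acc : Int) :
    PySem.Str.len t - 1 ≤ tags.foldl (fun m t => max m (PySem.Str.len t - 1)) acc := by
  induction tags generalizing acc with
  | nil => simp at ht
  | cons u ts ih =>
      simp only [List.foldl_cons]
      rcases List.mem_cons.mp ht with h | h
      · subst h; exact le_trans (le_max_right _ _) (foldmax_init _ _)
      · exact ih h _

lemma innerA_aux (text t : String) (m : Nat) (acc : Int) :
    acc ≤ (PySem.List.pyRange 1 (1 + (m : Int)) 1).foldl (pvStepA text t) acc ∧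
    ((PySem.List.pyRange 1 (1 + (m : Int)) 1).foldl (pvStepA text t) acc = acc ∨
      (1 ≤ (PySem.List.pyRange 1 (1 + (m : Int)) 1).foldl (pvStepA text t) acc ∧
       (PySem.List.pyRange 1 (1 + (m : Int)) 1).foldl (pvStepA text t) acc < 1 + (m : Int) ∧
       pvCondA text t ((PySem.List.pyRange 1 (1 + (m : Int)) 1).foldl (pvStepA text t) acc) = true)) ∧
    (∀ i : Int, 1 ≤ i → i < 1 + (m : Int) → pvCondA text t i = true →
      i ≤ (PySem.List.pyRange 1 (1 + (m : Int)) 1).foldl (pvStepA text t) acc) := by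
  induction m with
  | zero =>
      rw [PySem.List.pyRange_one_eq_nil (by omega)]
      simp only [List.foldl_nil]
      refine ⟨le_refl _, Or.inl trivial, ?_⟩
      intro i h1 h2 _
      omega
  | succ m ih =>
      have hsplit : PySem.List.pyRange 1 (1 + ((m + 1 : Nat) : Int)) 1
          = PySem.List.pyRange 1 (1 + (m : Int)) 1 ++ [1 + (m : Int)] := by
        have : (1 : Int) + ((m + 1 : Nat) : Int) = (1 + (m : Int)) + 1 := by push_cast; ring
        rw [this, PySem.List.pyRange_one_succ_right (by omega)]
      rw [hsplit, List.foldl_append]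
      obtain ⟨ih1, ih2, ih3⟩ := ih
      set r0 := (PySem.List.pyRange 1 (1 + (m : Int)) 1).foldl (pvStepA text t) acc with hr0
      simp only [List.foldl_cons, List.foldl_nil]
      by_cases hc : (pvCondA text t (1 + (m : Int)) && decide (1 + (m : Int) > r0)) = true
      · simp only [pvStepA, hc, if_true]
        simp only [Bool.and_eq_true, decide_eq_true_eq] at hc
        refine ⟨by omega, Or.inr ⟨by omega, by push_cast; omega, hc.1⟩, ?_⟩
        intro i h1 h2 _
        push_cast at h2
        omega
      · simp only [pvStepA, hc]
        refine ⟨ih1, ?_, ?_⟩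
        · rcases ih2 with h | ⟨ha, hb, hcnd⟩
          · exact Or.inl h
          · exact Or.inr ⟨ha, by push_cast; omega, hcnd⟩
        · intro i h1 h2 hcnd
          by_cases hi : i < 1 + (m : Int)
          · exact ih3 i h1 hi hcnd
          · have hieq : i = 1 + (m : Int) := by push_cast at h2; omega
            subst hieq
            simp only [Bool.and_eq_true, decide_eq_true_eq, not_and] at hc
            have := hc hcnd
            omega

lemma innerA_spec (text t : String) (b : Int) (acc : Int) :
    acc ≤ (PySem.List.pyRange 1 b 1).foldl (pvStepA text t) acc ∧
    ((PySem.List.pyRange 1 b 1).foldl (pvStepA text t) acc = acc ∨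
      (1 ≤ (PySem.List.pyRange 1 b 1).foldl (pvStepA text t) acc ∧
       (PySem.List.pyRange 1 b 1).foldl (pvStepA text t) acc < b ∧
       pvCondA text t ((PySem.List.pyRange 1 b 1).foldl (pvStepA text t) acc) = true)) ∧
    (∀ i : Int, 1 ≤ i → i < b → pvCondA text t i = true →
      i ≤ (PySem.List.pyRange 1 b 1).foldl (pvStepA text t) acc) := by
  by_cases hb : b ≤ 1
  · rw [PySem.List.pyRange_one_eq_nil hb]
    simp only [List.foldl_nil]
    refine ⟨le_refl _, Or.inl trivial, ?_⟩
    intro i h1 h2 _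
    omega
  · have : b = 1 + ((b - 1).toNat : Int) := by omega
    rw [this]
    exact innerA_aux text t (b - 1).toNat acc

lemma strlen_toList (t : String) : PySem.Str.len t = (t.toList.length : Int) := by simp

lemma outerA_spec (text : String) (tags : List String) (acc : Int) (hacc : 0 ≤ acc) :
    acc ≤ tags.foldl (fun a t =>
        (PySem.List.pyRange 1 (min (PySem.Str.len t - 1) (PySem.Str.len text) + 1) 1).foldl
          (pvStepA text t) a) acc ∧
    (tags.foldl (fun a t =>
        (PySem.List.pyRange 1 (min (PySem.Str.len t - 1) (PySem.Str.len text) + 1) 1).foldl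
          (pvStepA text t) a) acc = acc ∨
      (1 ≤ tags.foldl (fun a t =>
        (PySem.List.pyRange 1 (min (PySem.Str.len t - 1) (PySem.Str.len text) + 1) 1).foldl
          (pvStepA text t) a) acc ∧
       pvP text.toList tags (tags.foldl (fun a t =>
        (PySem.List.pyRange 1 (min (PySem.Str.len t - 1) (PySem.Str.len text) + 1) 1).foldl
          (pvStepA text t) a) acc).toNat)) ∧
    (∀ k : Nat, 1 ≤ k → pvP text.toList tags k →
      (k : Int) ≤ tags.foldl (fun a t =>
        (PySem.List.pyRange 1 (min (PySem.Str.len t - 1) (PySem.Str.len text) + 1) 1).foldl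
          (pvStepA text t) a) acc) := by
  induction tags generalizing acc with
  | nil =>
      simp only [List.foldl_nil]
      refine ⟨le_refl _, Or.inl trivial, ?_⟩
      intro k h1 hP
      obtain ⟨t, ht, _⟩ := hP
      simp at ht
  | cons t ts ih =>
      simp only [List.foldl_cons]
      set b := min (PySem.Str.len t - 1) (PySem.Str.len text) + 1 with hbdef
      obtain ⟨i1, i2, i3⟩ := innerA_spec text t b acc
      set a1 := (PySem.List.pyRange 1 b 1).foldl (pvStepA text t) acc with ha1
      have ha1nn : 0 ≤ a1 := le_trans hacc i1
      obtain ⟨o1, o2, o3⟩ := ih a1 ha1nn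
      set r := ts.foldl (fun a t =>
        (PySem.List.pyRange 1 (min (PySem.Str.len t - 1) (PySem.Str.len text) + 1) 1).foldl
          (pvStepA text t) a) a1 with hr
      have hPa1 : a1 = acc ∨ (1 ≤ a1 ∧ pvP text.toList (t :: ts) a1.toNat) := by
        rcases i2 with h | ⟨h1, h2, h3⟩
        · exact Or.inl h
        · right
          refine ⟨h1, t, List.mem_cons_self .., ?_, ?_⟩
          · rw [strlen_toList] at hbdef
            omega
          · have := (condA_iff text t a1 h1).mp h3
            exact this
      refine ⟨le_trans i1 o1, ?_, ?_⟩
      · rcases o2 with h | ⟨h1, h2⟩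
        · rw [h]
          rcases hPa1 with h' | ⟨h1', h2'⟩
          · exact Or.inl h'
          · exact Or.inr ⟨h1', h2'⟩
        · refine Or.inr ⟨h1, ?_⟩
          obtain ⟨u, hu, h3, h4⟩ := h2
          exact ⟨u, List.mem_cons_of_mem _ hu, h3, h4⟩
      · intro k h1 hP
        obtain ⟨u, hu, hklen, hksuf⟩ := hP
        rcases List.mem_cons.mp hu with h | h
        · subst h
          have hkn : k ≤ text.toList.length := pvP_le _ [u] k ⟨u, List.mem_singleton_self u, hklen, hksuf⟩
          have hkb : (k : Int) < b := by
            rw [strlen_toList, strlen_toList] at hbdef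
            omega
          have hcnd : pvCondA text u (k : Int) = true := by
            rw [condA_iff text u (k : Int) (by exact_mod_cast h1)]
            simpa using hksuf
          exact le_trans (i3 (k : Int) (by exact_mod_cast h1) hkb hcnd) o1
        · exact o3 k h1 ⟨u, h, hklen, hksuf⟩

lemma altGo_spec (text : String) (tags : List String) (m : Nat) (hm : m ≤ text.toList.length) :
    (pvAltGo text tags m = 0 ∨
      (1 ≤ pvAltGo text tags m ∧ pvAltGo text tags m ≤ (m : Int) ∧
       pvP text.toList tags (pvAltGo text tags m).toNat)) ∧
    (∀ k : Nat, 1 ≤ k → k ≤ m → pvP text.toList tags k → (k : Int) ≤ pvAltGo text tags m) := by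
  induction m with
  | zero =>
      refine ⟨Or.inl rfl, ?_⟩
      intro k h1 h2 _
      omega
  | succ m ih =>
      obtain ⟨ih1, ih2⟩ := ih (by omega)
      by_cases hc : pvCondB text tags ((m : Int) + 1) = true
      · have hr : pvAltGo text tags (m + 1) = (m : Int) + 1 := by
          simp [pvAltGo, hc]
        rw [hr]
        have hP : pvP text.toList tags (m + 1) := (condB_iff text tags m hm).mp hc
        refine ⟨Or.inr ⟨by omega, by push_cast; omega, ?_⟩, ?_⟩
        · have : ((m : Int) + 1).toNat = m + 1 := by omega
          rw [this]; exact hP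
        · intro k h1 h2 _
          omega
      · have hr : pvAltGo text tags (m + 1) = pvAltGo text tags m := by
          simp [pvAltGo, hc]
        rw [hr]
        refine ⟨?_, ?_⟩
        · rcases ih1 with h | ⟨h1, h2, h3⟩
          · exact Or.inl h
          · exact Or.inr ⟨h1, by push_cast; omega, h3⟩
        · intro k h1 h2 hP
          by_cases hk : k ≤ m
          · exact ih2 k h1 hk hP
          · exfalso
            have hkeq : k = m + 1 := by omega
            subst hkeq
            exact hc ((condB_iff text tags m hm).mpr hP)

-- ===== VERDICT (by name: the statement is the Claim_ definition above) =====
theorem longest_tag_prefix_suffix_py_spec : Claim_equal_longest_tag_prefix_suffix_py := by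
  intro text tags _
  unfold Spec_longest_tag_prefix_suffix_py
  rw [portA_eq]
  obtain ⟨a1, a2, a3⟩ := outerA_spec text tags 0 le_rfl
  set rA := tags.foldl (fun a t =>
        (PySem.List.pyRange 1 (min (PySem.Str.len t - 1) (PySem.Str.len text) + 1) 1).foldl
          (pvStepA text t) a) 0 with hrA
  show rA = longest_tag_prefix_suffix_py_alt text tags
  unfold longest_tag_prefix_suffix_py_alt
  set mx := tags.foldl (fun m t => max m (PySem.Str.len t - 1)) 0 with hmx
  have hmx0 : 0 ≤ mx := foldmax_init tags 0
  have hlen : PySem.Str.len text = (text.toList.length : Int) := strlen_toList text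
  have hhi_le : (min (PySem.Str.len text) mx).toNat ≤ text.toList.length := by omega
  obtain ⟨b1, b2⟩ := altGo_spec text tags (min (PySem.Str.len text) mx).toNat hhi_le
  set rB := pvAltGo text tags (min (PySem.Str.len text) mx).toNat with hrB
  have hbound : ∀ k : Nat, 1 ≤ k → pvP text.toList tags k → k ≤ (min (PySem.Str.len text) mx).toNat := by
    intro k h1 hP
    have hkn := pvP_le _ _ _ hP
    obtain ⟨t, ht, hklen, _⟩ := hP
    have hmem := foldmax_mem tags t ht 0
    rw [strlen_toList] at hmem
    rw [← hmx] at hmem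
    omega
  rcases a2 with hA0 | ⟨hA1, hAP⟩
  · rcases b1 with hB0 | ⟨hB1, _, hBP⟩
    · rw [hA0, hB0]
    · exfalso
      have := a3 rB.toNat (by omega) hBP
      omega
  · rcases b1 with hB0 | ⟨hB1, _, hBP⟩
    · exfalso
      have hk1 : 1 ≤ rA.toNat := by omega
      have := b2 rA.toNat hk1 (hbound _ hk1 hAP) hAP
      omega
    · have h1 := b2 rA.toNat (by omega) (hbound _ (by omega) hAP) hAP
      have h2 := a3 rB.toNat (by omega) hBP
      omega
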